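-- pv_equiv track=rewrite | github.com/bloggerwang1217/clef | src/score/kern_zeng_compat.py | split_breve_token
-- ===== SOURCE A (Python) =====
-- from typing import Dict, List, Tuple, Optional, Set
--
-- BREVE_SPLIT_MAP = {
--     '0': ('1', 2),      # breve → 2 tied whole notes
--     '0.': ('1.', 2),    # dotted breve → 2 tied dotted wholes (approximation)
--     '00': ('1', 4),     # longa → 4 tied whole notes
--     '00.': ('1.', 4),   # dotted longa → 4 tied dotted wholes (approximation)
-- }
--
-- def split_breve_token(token: str) -> Optional[List[str]]:
--     """
--     Split a breve/longa token into tied whole notes (or multiple rests).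
--
--     Args:
--         token: A kern token that may start with breve duration (0 or 00)
--
--     Returns:
--         List of split tokens if breve found, None otherwise
--
--     Examples:
--         0c → ['[1c', '1c]']  (tied notes)
--         0r → ['1r', '1r']    (two rests, no ties needed)
--         00CC → ['[1CC', '1CC_', '1CC_', '1CC]']
--         4c → None (not a breve)
--     """
--     # Check for breve durations (check longer patterns first)
--     for breve_dur in ['00.', '00', '0.', '0']:
--         if breve_dur not in BREVE_SPLIT_MAP:
--             continue
--         split_dur, count = BREVE_SPLIT_MAP[breve_dur]
--
--         if token.startswith(breve_dur):
--             # Extract pitch part (everything after duration)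
--             pitch_part = token[len(breve_dur):]
--
--             # Handle rests: just repeat, no ties needed
--             if pitch_part.startswith('r'):
--                 # Strip any position markers from rest (e.g., 0rGG → 1r)
--                 return [f'{split_dur}r'] * count
--
--             # Create tied sequence for notes
--             result = []
--             for i in range(count):
--                 if i == 0:
--                     # First note: tie start
--                     result.append(f'[{split_dur}{pitch_part}')
--                 elif i == count - 1:
--                     # Last note: tie end
--                     result.append(f'{split_dur}{pitch_part}]')
--                 else:
--                     # Middle notes: tie continue
--                     result.append(f'{split_dur}{pitch_part}_')
--             return result
--
--     return None
-- ===== SOURCE B (Python) =====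
-- def _breve(rest):
--     # split of a breve '0' + rest: two tied whole notes (or two rests)
--     dot = rest.startswith('.')
--     dur = '1.' if dot else '1'
--     pitch = rest[1:] if dot else rest
--     if pitch.startswith('r'):
--         return [dur + 'r', dur + 'r']
--     return ['[' + dur + pitch, dur + pitch + ']']
--
-- def split_breve_token(token):
--     # Halving decomposition: a longa ('00'...) is two breve halves glued
--     # together (tie-end of the first and tie-start of the second become
--     # tie-continues); no duration table and no index loop.
--     if token.startswith('00'):
--         half = _breve(token[2:])
--         if half[0].startswith('['):
--             return half[:-1] + [half[-1][:-1] + '_', half[0][1:] + '_'] + half[1:]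
--         return half + half  # rests: plain repetition
--     if token.startswith('0'):
--         return _breve(token[1:])
--     return None
-- ===== Notes on version B (the rewrite author's own statement) =====
-- stated objective: alternative
-- what changed: Replaces the duration table + longest-prefix-first loop and the index-branching range loop by a halving decomposition: a breve splits directly into two tied tokens, and a longa is computed by gluing two breve halves (tie-end/tie-start of the halves become tie-continues; rests simply repeat).
import Mathlib
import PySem

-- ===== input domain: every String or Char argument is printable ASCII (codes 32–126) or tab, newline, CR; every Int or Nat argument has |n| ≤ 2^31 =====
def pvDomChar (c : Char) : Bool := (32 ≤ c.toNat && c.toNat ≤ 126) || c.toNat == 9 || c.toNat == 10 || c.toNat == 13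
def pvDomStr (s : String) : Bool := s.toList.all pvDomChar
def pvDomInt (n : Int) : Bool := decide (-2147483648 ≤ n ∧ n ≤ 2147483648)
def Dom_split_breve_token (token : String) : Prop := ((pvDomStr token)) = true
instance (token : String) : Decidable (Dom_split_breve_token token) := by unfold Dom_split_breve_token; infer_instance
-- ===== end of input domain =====

-- B replaces A's dict + longest-prefix loop and index-branching range loop by a halving
-- decomposition: a longa is two glued breve halves; objective: alternative.


-- ===== PORT A =====
-- exact Python string concatenation '+' (kernel-transparent, unlike String.append)
def pvCat (a b : String) : String := String.ofList (a.toList ++ b.toList)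

def BREVE_SPLIT_MAP : PySem.Dict String (String × Int) :=
  PySem.Dict.ofList [("0", ("1", 2)), ("0.", ("1.", 2)), ("00", ("1", 4)), ("00.", ("1.", 4))]

-- the 'for breve_dur in [...]' loop of A, recursing over the remaining prefixes
def splitBreveLoop (token : String) : List String → Option (List String)
  | [] => none
  | breve_dur :: restDurs =>
    match PySem.Dict.get? BREVE_SPLIT_MAP breve_dur with
    | none => splitBreveLoop token restDurs          -- 'continue'
    | some (split_dur, count) =>
      if PySem.Str.startswith token breve_dur then
        let pitch_part := PySem.Str.slice token (some (PySem.Str.len breve_dur)) none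
        if PySem.Str.startswith pitch_part "r" then
          some (List.replicate count.toNat (pvCat split_dur "r"))   -- [..] * count
        else
          some ((PySem.List.pyRange 0 count 1).foldl (fun result i =>
            if i == 0 then result ++ [pvCat "[" (pvCat split_dur pitch_part)]
            else if i == count - 1 then result ++ [pvCat (pvCat split_dur pitch_part) "]"]
            else result ++ [pvCat (pvCat split_dur pitch_part) "_"]) [])
      else splitBreveLoop token restDurs

def split_breve_token (token : String) : Option (List String) :=
  splitBreveLoop token ["00.", "00", "0.", "0"]

-- ===== PORT B =====
-- _breve: split of a breve '0' + rest
def breveHalf (rest : String) : List String :=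
  let dot := PySem.Str.startswith rest "."
  let dur := if dot then "1." else "1"
  let pitch := if dot then PySem.Str.slice rest (some 1) none else rest
  if PySem.Str.startswith pitch "r" then [pvCat dur "r", pvCat dur "r"]
  else [pvCat "[" (pvCat dur pitch), pvCat (pvCat dur pitch) "]"]

-- half[0] / half[-1] ported with a default: breveHalf always returns a 2-element list,
-- so the default is never used (Python would raise only on an empty list)
def split_breve_token_alt (token : String) : Option (List String) :=
  if PySem.Str.startswith token "00" then
    let half := breveHalf (PySem.Str.slice token (some 2) none)
    if PySem.Str.startswith (PySem.List.pyGetD half 0 "") "[" then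
      some (PySem.List.slice half none (some (-1))
            ++ [pvCat (PySem.Str.slice (PySem.List.pyGetD half (-1) "") none (some (-1))) "_",
                pvCat (PySem.Str.slice (PySem.List.pyGetD half 0 "") (some 1) none) "_"]
            ++ PySem.List.slice half (some 1) none)
    else some (half ++ half)
  else if PySem.Str.startswith token "0" then
    some (breveHalf (PySem.Str.slice token (some 1) none))
  else none

-- ===== PRECONDITION & SPEC =====
def Spec_split_breve_token (token : String) (out : Option (List String)) : Prop := out = split_breve_token_alt token
instance (token : String) (out : Option (List String)) : Decidable (Spec_split_breve_token token out) := by unfold Spec_split_breve_token; infer_instance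

-- ===== CLAIM (what is proved, stated in full; the proofs are below) =====
def Claim_equal_split_breve_token : Prop := ∀ (token : String), Dom_split_breve_token token → Spec_split_breve_token token (split_breve_token token)

-- ===== LEMMAS AND PROOFS =====

theorem split_breve_token_eq (token : String) :
    split_breve_token token = split_breve_token_alt token := by
  have m1 : BREVE_SPLIT_MAP.get? "00." = some ("1.", 4) := by decide
  have m2 : BREVE_SPLIT_MAP.get? "00" = some ("1", 4) := by decide
  have m3 : BREVE_SPLIT_MAP.get? "0." = some ("1.", 2) := by decide
  have m4 : BREVE_SPLIT_MAP.get? "0" = some ("1", 2) := by decide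
  have r4 : PySem.List.pyRange 0 4 1 = [0, 1, 2, 3] := by decide
  have r2 : PySem.List.pyRange 0 2 1 = [0, 1] := by decide
  rcases hl : token.toList with _ | ⟨c, t⟩
  · simp [split_breve_token, split_breve_token_alt, splitBreveLoop, m1, m2, m3, m4,
      PySem.Str.startswith, PySem.Chars.startswith, hl]
  · by_cases hc : c = '0'
    · subst hc
      rcases t with _ | ⟨c2, t2⟩
      · simp [split_breve_token, split_breve_token_alt, splitBreveLoop, breveHalf, m1, m2, m3, m4,
          r2, PySem.Str.startswith, PySem.Chars.startswith, List.isPrefixOf,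
          PySem.Str.slice, PySem.Chars.slice, PySem.List.slice, PySem.Str.len,
          pvCat, hl]
      · by_cases h2 : c2 = '0'
        · subst h2
          rcases t2 with _ | ⟨c3, t3⟩
          · simp [split_breve_token, split_breve_token_alt, splitBreveLoop, breveHalf, m1, m2,
              r4, PySem.Str.startswith, PySem.Chars.startswith, List.isPrefixOf,
              PySem.Str.slice, PySem.Chars.slice, PySem.List.slice,
              PySem.Str.len, PySem.List.pyGetD, PySem.List.pyGet?, PySem.List.pyIdx?, pvCat, hl]
          · by_cases h3 : c3 = '.'
            · subst h3
              by_cases hr : ['r'] <+: t3 <;>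
                simp [split_breve_token, split_breve_token_alt, splitBreveLoop, breveHalf, m1,
                  r4, PySem.Str.startswith, PySem.Chars.startswith, List.isPrefixOf,
                  PySem.Str.slice, PySem.Chars.slice, PySem.List.slice, PySem.Str.len,
                  PySem.List.pyGetD, PySem.List.pyGet?, PySem.List.pyIdx?, pvCat, hl, hr]
            · have h3' : ¬('.' = c3) := fun h => h3 h.symm
              by_cases hr : c3 = 'r'
              · subst hr
                simp [split_breve_token, split_breve_token_alt, splitBreveLoop, breveHalf, m1, m2,
                  PySem.Str.startswith, PySem.Chars.startswith, List.isPrefixOf,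
                  PySem.Str.slice, PySem.Chars.slice, PySem.List.slice, PySem.Str.len,
                  PySem.List.pyGetD, PySem.List.pyGet?, PySem.List.pyIdx?, pvCat, hl]
              · have hr' : ¬('r' = c3) := fun h => hr h.symm
                simp [split_breve_token, split_breve_token_alt, splitBreveLoop, breveHalf, m1, m2,
                  r4, PySem.Str.startswith, PySem.Chars.startswith, List.isPrefixOf,
                  PySem.Str.slice, PySem.Chars.slice, PySem.List.slice, PySem.Str.len,
                  PySem.List.pyGetD, PySem.List.pyGet?, PySem.List.pyIdx?, pvCat, hl, h3', hr']
        · by_cases h2d : c2 = '.'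
          · subst h2d
            have h2' : ¬('0' = ('.' : Char)) := by decide
            simp [split_breve_token, split_breve_token_alt, splitBreveLoop, breveHalf, m1, m2, m3,
              r2, PySem.Str.startswith, PySem.Chars.startswith, List.isPrefixOf,
              PySem.Str.slice, PySem.Chars.slice, PySem.List.slice, PySem.Str.len,
              pvCat, hl]
            split <;> rfl
          · have h2' : ¬('0' = c2) := fun h => h2 h.symm
            have h2d' : ¬('.' = c2) := fun h => h2d h.symm
            simp [split_breve_token, split_breve_token_alt, splitBreveLoop, breveHalf, m1, m2, m3, m4,
              r2, PySem.Str.startswith, PySem.Chars.startswith, List.isPrefixOf,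
              PySem.Str.slice, PySem.Chars.slice, PySem.List.slice, PySem.Str.len,
              pvCat, hl, h2', h2d']
            split <;> rfl
    · have hc' : ¬('0' = c) := fun h => hc h.symm
      simp [split_breve_token, split_breve_token_alt, splitBreveLoop, m1, m2, m3, m4,
        PySem.Str.startswith, PySem.Chars.startswith, List.isPrefixOf, hl, hc']

-- ===== VERDICT (by name: the statement is the Claim_ definition above) =====
theorem split_breve_token_spec : Claim_equal_split_breve_token := by
  intro token _
  exact split_breve_token_eq token
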